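-- pv_equiv track=rewrite | github.com/MegoM2323/Educational-platform-the-bot | backend/config/cdn_settings.py | get_cache_control_header
-- ===== SOURCE A (Python) =====
-- CACHE_CONTROL_HASHED_ASSETS = "public, max-age=31536000, immutable"  # 1 year
--
-- CACHE_CONTROL_STATIC_FILES = "public, max-age=2592000, must-revalidate"  # 30 days
--
-- CACHE_CONTROL_MEDIA_FILES = "public, max-age=604800, must-revalidate"  # 7 days
--
-- CACHE_CONTROL_HTML = "public, max-age=3600, must-revalidate"  # 1 hour
--
-- def get_cache_control_header(file_path: str) -> str:
--     """
--     Get appropriate Cache-Control header for file.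
--
--     Args:
--         file_path: File path to determine cache strategy
--
--     Returns:
--         Cache-Control header value
--     """
--     # Check if file has hash in name (e.g., app-abc123.js)
--     if any(f"-{c}" in file_path for c in "abcdef0123456789"):
--         return CACHE_CONTROL_HASHED_ASSETS
--
--     # HTML files - short TTL for quick updates
--     if file_path.endswith('.html'):
--         return CACHE_CONTROL_HTML
--
--     # Static files - longer TTL
--     if any(file_path.endswith(ext) for ext in ['.js', '.css', '.json', '.xml']):
--         return CACHE_CONTROL_STATIC_FILES
--
--     # Media files - medium TTL
--     if any(file_path.endswith(ext) for ext in [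
--         '.pdf', '.doc', '.docx', '.xls', '.xlsx',
--         '.png', '.jpg', '.jpeg', '.gif', '.svg',
--         '.mp4', '.webm', '.mp3', '.wav'
--     ]):
--         return CACHE_CONTROL_MEDIA_FILES
--
--     # Default
--     return CACHE_CONTROL_STATIC_FILES
-- ===== SOURCE B (Python) =====
-- CACHE_CONTROL_HASHED_ASSETS = "public, max-age=31536000, immutable"  # 1 year
-- CACHE_CONTROL_STATIC_FILES = "public, max-age=2592000, must-revalidate"  # 30 days
-- CACHE_CONTROL_MEDIA_FILES = "public, max-age=604800, must-revalidate"  # 7 days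
-- CACHE_CONTROL_HTML = "public, max-age=3600, must-revalidate"  # 1 hour
--
-- _HEX = "abcdef0123456789"
--
-- _EXT_MAP = {
--     '.html': CACHE_CONTROL_HTML,
--     '.js': CACHE_CONTROL_STATIC_FILES,
--     '.css': CACHE_CONTROL_STATIC_FILES,
--     '.json': CACHE_CONTROL_STATIC_FILES,
--     '.xml': CACHE_CONTROL_STATIC_FILES,
--     '.pdf': CACHE_CONTROL_MEDIA_FILES,
--     '.doc': CACHE_CONTROL_MEDIA_FILES,
--     '.docx': CACHE_CONTROL_MEDIA_FILES,
--     '.xls': CACHE_CONTROL_MEDIA_FILES,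
--     '.xlsx': CACHE_CONTROL_MEDIA_FILES,
--     '.png': CACHE_CONTROL_MEDIA_FILES,
--     '.jpg': CACHE_CONTROL_MEDIA_FILES,
--     '.jpeg': CACHE_CONTROL_MEDIA_FILES,
--     '.gif': CACHE_CONTROL_MEDIA_FILES,
--     '.svg': CACHE_CONTROL_MEDIA_FILES,
--     '.mp4': CACHE_CONTROL_MEDIA_FILES,
--     '.webm': CACHE_CONTROL_MEDIA_FILES,
--     '.mp3': CACHE_CONTROL_MEDIA_FILES,
--     '.wav': CACHE_CONTROL_MEDIA_FILES,
-- }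
--
--
-- def get_cache_control_header(file_path: str) -> str:
--     # Hash-in-name check: one adjacent-pair scan instead of 16 substring searches.
--     if any(a == '-' and b in _HEX for a, b in zip(file_path, file_path[1:])):
--         return CACHE_CONTROL_HASHED_ASSETS
--     # Extract the extension once and answer with a single table lookup.
--     idx = file_path.rfind('.')
--     ext = file_path[idx:] if idx != -1 else ''
--     return _EXT_MAP.get(ext, CACHE_CONTROL_STATIC_FILES)
-- ===== Notes on version B (the rewrite author's own statement) =====
-- stated objective: simpler
-- what changed: Replaces the 16 substring searches of the hash check with one adjacent-pair scan, and the three endswith chains with a single extension extraction (rfind) plus one dict lookup.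
import Mathlib
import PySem

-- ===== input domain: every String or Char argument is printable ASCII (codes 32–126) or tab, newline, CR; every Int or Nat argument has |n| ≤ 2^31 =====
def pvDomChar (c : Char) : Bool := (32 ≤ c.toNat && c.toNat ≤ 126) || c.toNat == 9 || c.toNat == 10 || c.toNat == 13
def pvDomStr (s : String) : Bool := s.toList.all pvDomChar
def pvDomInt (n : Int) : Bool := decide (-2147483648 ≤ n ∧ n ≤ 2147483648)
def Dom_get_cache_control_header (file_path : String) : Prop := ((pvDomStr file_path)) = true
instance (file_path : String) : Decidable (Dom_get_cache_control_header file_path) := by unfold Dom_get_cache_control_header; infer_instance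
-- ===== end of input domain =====

-- B replaces A's 16 substring searches and three endswith chains by one adjacent-pair
-- scan plus a single last-dot extension lookup in a table (objective: simpler).

def pvHASHED : String := "public, max-age=31536000, immutable"
def pvSTATIC : String := "public, max-age=2592000, must-revalidate"
def pvMEDIA : String := "public, max-age=604800, must-revalidate"
def pvHTML : String := "public, max-age=3600, must-revalidate"

-- ===== PORT A =====
def get_cache_control_header (file_path : String) : String :=
  -- any(f"-{c}" in file_path for c in "abcdef0123456789")
  if "abcdef0123456789".toList.any (fun c => PySem.Str.isIn (String.ofList ['-', c]) file_path) then
    pvHASHED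
  else if PySem.Str.endswith file_path ".html" then
    pvHTML
  else if [".js", ".css", ".json", ".xml"].any (fun ext => PySem.Str.endswith file_path ext) then
    pvSTATIC
  else if [".pdf", ".doc", ".docx", ".xls", ".xlsx",
           ".png", ".jpg", ".jpeg", ".gif", ".svg",
           ".mp4", ".webm", ".mp3", ".wav"].any (fun ext => PySem.Str.endswith file_path ext) then
    pvMEDIA
  else
    pvSTATIC

-- ===== PORT B =====
-- the module-level dict _EXT_MAP of Source B (a dict literal with distinct keys)
def pvExtMap : PySem.Dict String String := PySem.Dict.mk
  [(".html", pvHTML),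
   (".js", pvSTATIC), (".css", pvSTATIC), (".json", pvSTATIC), (".xml", pvSTATIC),
   (".pdf", pvMEDIA), (".doc", pvMEDIA), (".docx", pvMEDIA), (".xls", pvMEDIA), (".xlsx", pvMEDIA),
   (".png", pvMEDIA), (".jpg", pvMEDIA), (".jpeg", pvMEDIA), (".gif", pvMEDIA), (".svg", pvMEDIA),
   (".mp4", pvMEDIA), (".webm", pvMEDIA), (".mp3", pvMEDIA), (".wav", pvMEDIA)]

def get_cache_control_header_alt (file_path : String) : String :=
  let cs := file_path.toList
  -- any(a == '-' and b in _HEX for a, b in zip(file_path, file_path[1:]))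
  if (cs.zip (cs.drop 1)).any (fun p => p.1 == '-' && "abcdef0123456789".toList.contains p.2) then
    pvHASHED
  else
    -- idx = file_path.rfind('.'); ext = file_path[idx:] if idx != -1 else ''
    let idx := PySem.Str.rfind file_path "."
    let ext := if idx ≠ -1 then PySem.Str.slice file_path (some idx) none else ""
    PySem.Dict.getD pvExtMap ext pvSTATIC

-- ===== PRECONDITION & SPEC =====
def Spec_get_cache_control_header (file_path : String) (out : String) : Prop := out = get_cache_control_header_alt file_path
instance (file_path : String) (out : String) : Decidable (Spec_get_cache_control_header file_path out) := by unfold Spec_get_cache_control_header; infer_instance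

-- ===== CLAIM (what is proved, stated in full; the proofs are below) =====
def Claim_equal_get_cache_control_header : Prop := ∀ (file_path : String), Dom_get_cache_control_header file_path → Spec_get_cache_control_header file_path (get_cache_control_header file_path)

-- ===== LEMMAS AND PROOFS =====

lemma pv_pair_infix (a b : Char) (cs : List Char) :
    [a, b] <:+: cs ↔ (a, b) ∈ cs.zip (cs.drop 1) := by
  induction cs with
  | nil => simp
  | cons x rest ih =>
    rw [List.infix_cons_iff]
    cases rest with
    | nil => simp [List.prefix_cons_iff]
    | cons y r =>
      have ih' : ([a, b] <:+: y :: r) ↔ (a, b) ∈ (y :: r).zip r := by simpa using ih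
      simp only [List.drop_succ_cons, List.drop_zero, List.zip_cons_cons, List.mem_cons]
      constructor
      · rintro (hp | hi)
        · left
          rcases hp with ⟨t, ht⟩
          simp only [List.cons_append, List.nil_append, List.cons.injEq] at ht
          simp [ht.1, ht.2.1]
        · right; exact ih'.mp hi
      · rintro (he | hm)
        · left
          simp only [Prod.mk.injEq] at he
          exact ⟨r, by simp [he.1, he.2]⟩
        · right; exact ih'.mpr hm

lemma pv_hash_eq (s : String) :
    ("abcdef0123456789".toList.any (fun c => PySem.Str.isIn (String.ofList ['-', c]) s))
      = ((s.toList.zip (s.toList.drop 1)).any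
          (fun p => p.1 == '-' && "abcdef0123456789".toList.contains p.2)) := by
  rw [Bool.eq_iff_iff]
  simp only [List.any_eq_true, PySem.Str.isIn_eq, String.toList_ofList,
    PySem.Chars.isIn_iff_infix, pv_pair_infix, Bool.and_eq_true, beq_iff_eq,
    List.contains_eq_mem, decide_eq_true_eq]
  constructor
  · rintro ⟨c, hc, hm⟩
    exact ⟨('-', c), hm, rfl, by simpa using hc⟩
  · rintro ⟨⟨p1, p2⟩, hm, h1, h2⟩
    subst h1
    exact ⟨p2, by simpa using h2, hm⟩

lemma pv_go_none (cs : List Char) (h : '.' ∉ cs) (n : Nat) :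
    PySem.Chars.rfind.go cs ['.'] n = -1 := by
  induction n with
  | zero =>
    simp only [PySem.Chars.rfind.go]
    rw [if_neg]
    intro hp
    rw [List.isPrefixOf_iff_prefix] at hp
    exact h (hp.subset (by simp))
  | succ j ih =>
    simp only [PySem.Chars.rfind.go]
    rw [if_neg, ih]
    intro hp
    rw [List.isPrefixOf_iff_prefix] at hp
    have hmem : '.' ∈ List.drop (j+1) cs := hp.subset (by simp)
    exact h (List.mem_of_mem_drop hmem)

lemma pv_go_last (p u : List Char) (hu : '.' ∉ u) (n : Nat)
    (h1 : p.length ≤ n) (h2 : n ≤ (p ++ '.' :: u).length) :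
    PySem.Chars.rfind.go (p ++ '.' :: u) ['.'] n = p.length := by
  induction n with
  | zero =>
    have hp0 : p = [] := List.eq_nil_of_length_eq_zero (Nat.le_zero.mp h1)
    subst hp0
    simp [PySem.Chars.rfind.go]
  | succ j ih =>
    simp only [PySem.Chars.rfind.go]
    by_cases hpl : p.length = j + 1
    · rw [if_pos]
      · exact_mod_cast hpl.symm
      · rw [List.isPrefixOf_iff_prefix]
        have : List.drop (j+1) (p ++ '.' :: u) = '.' :: u := by
          rw [← hpl, List.drop_left]
        rw [this]
        exact ⟨u, rfl⟩
    · have hle : p.length ≤ j := by omega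
      rw [if_neg, ih hle (by simpa using Nat.le_of_succ_le h2)]
      rw [List.isPrefixOf_iff_prefix]
      intro hp
      have hdrop : List.drop (j+1) (p ++ '.' :: u) = List.drop (j - p.length) u := by
        have hj : j + 1 = p.length + (j + 1 - p.length) := by omega
        rw [hj, List.drop_append]
        have h3 : p.length + (j + 1 - p.length) - p.length = (j - p.length) + 1 := by omega
        rw [h3, List.drop_succ_cons]
        simp
      rw [hdrop] at hp
      exact hu (List.mem_of_mem_drop (hp.subset (by simp)))

lemma pv_last_dot (cs : List Char) (h : '.' ∈ cs) :
    ∃ p u, cs = p ++ '.' :: u ∧ '.' ∉ u := by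
  induction cs with
  | nil => simp at h
  | cons c rest ih =>
    by_cases hr : '.' ∈ rest
    · obtain ⟨p, u, hpu, hu⟩ := ih hr
      exact ⟨c :: p, u, by simp [hpu], hu⟩
    · have hc : c = '.' := by
        rcases List.mem_cons.mp h with h' | h'
        · exact h'.symm
        · exact absurd h' hr
      exact ⟨[], rest, by simp [hc], hr⟩

lemma pv_suffix_dot_unique {t u cs : List Char}
    (ht : ('.' :: t) <:+ cs) (hu : ('.' :: u) <:+ cs)
    (ht' : '.' ∉ t) (hu' : '.' ∉ u) : t = u := by
  rcases List.suffix_or_suffix_of_suffix ht hu with h | h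
  · rcases h with ⟨w, hw⟩
    cases w with
    | nil => simpa using hw
    | cons x w' =>
      exfalso
      have : '.' ∈ u := by
        have : u = w' ++ '.' :: t := by symm; simpa using congrArg List.tail hw
        rw [this]; simp
      exact hu' this
  · rcases h with ⟨w, hw⟩
    cases w with
    | nil => simpa using hw.symm
    | cons x w' =>
      exfalso
      have : '.' ∈ t := by
        have : t = w' ++ '.' :: u := by symm; simpa using congrArg List.tail hw
        rw [this]; simp
      exact ht' this

lemma pv_endswith_iff_ext (p u t : List Char) (hu : '.' ∉ u) (ht : '.' ∉ t) :
    PySem.Chars.endswith (p ++ '.' :: u) ('.' :: t) = true ↔ t = u := by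
  rw [PySem.Chars.endswith_iff]
  constructor
  · intro hs
    exact pv_suffix_dot_unique hs ⟨p, rfl⟩ ht hu
  · rintro rfl
    exact ⟨p, rfl⟩
lemma pv_dict_eq (ext : String) (u : List Char) (hu : ext.toList = '.' :: u) :
    PySem.Dict.getD pvExtMap ext pvSTATIC =
      (if u = ['h', 't', 'm', 'l'] then pvHTML else if u = ['j', 's'] then pvSTATIC else if u = ['c', 's', 's'] then pvSTATIC else if u = ['j', 's', 'o', 'n'] then pvSTATIC else if u = ['x', 'm', 'l'] then pvSTATIC else if u = ['p', 'd', 'f'] then pvMEDIA else if u = ['d', 'o', 'c'] then pvMEDIA else if u = ['d', 'o', 'c', 'x'] then pvMEDIA else if u = ['x', 'l', 's'] then pvMEDIA else if u = ['x', 'l', 's', 'x'] then pvMEDIA else if u = ['p', 'n', 'g'] then pvMEDIA else if u = ['j', 'p', 'g'] then pvMEDIA else if u = ['j', 'p', 'e', 'g'] then pvMEDIA else if u = ['g', 'i', 'f'] then pvMEDIA else if u = ['s', 'v', 'g'] then pvMEDIA else if u = ['m', 'p', '4'] then pvMEDIA else if u = ['w', 'e', 'b', 'm'] then pvMEDIA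 else if u = ['m', 'p', '3'] then pvMEDIA else if u = ['w', 'a', 'v'] then pvMEDIA else pvSTATIC) := by
  have hk : ∀ k : String, (k == ext) = decide (k.toList = '.' :: u) := by
    intro k
    rw [Bool.eq_iff_iff, beq_iff_eq, decide_eq_true_eq, ← hu]
    exact ⟨fun h => h ▸ rfl, fun h => String.toList_inj.mp h⟩
  simp only [PySem.Dict.getD, PySem.Dict.get?, pvExtMap, List.find?, hk]
  by_cases h1 : u = ['h', 't', 'm', 'l']
  · simp [h1]
  by_cases h2 : u = ['j', 's']
  · simp [h2]
  by_cases h3 : u = ['c', 's', 's']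
  · simp [h3]
  by_cases h4 : u = ['j', 's', 'o', 'n']
  · simp [h4]
  by_cases h5 : u = ['x', 'm', 'l']
  · simp [h5]
  by_cases h6 : u = ['p', 'd', 'f']
  · simp [h6]
  by_cases h7 : u = ['d', 'o', 'c']
  · simp [h7]
  by_cases h8 : u = ['d', 'o', 'c', 'x']
  · simp [h8]
  by_cases h9 : u = ['x', 'l', 's']
  · simp [h9]
  by_cases h10 : u = ['x', 'l', 's', 'x']
  · simp [h10]
  by_cases h11 : u = ['p', 'n', 'g']
  · simp [h11]
  by_cases h12 : u = ['j', 'p', 'g']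
  · simp [h12]
  by_cases h13 : u = ['j', 'p', 'e', 'g']
  · simp [h13]
  by_cases h14 : u = ['g', 'i', 'f']
  · simp [h14]
  by_cases h15 : u = ['s', 'v', 'g']
  · simp [h15]
  by_cases h16 : u = ['m', 'p', '4']
  · simp [h16]
  by_cases h17 : u = ['w', 'e', 'b', 'm']
  · simp [h17]
  by_cases h18 : u = ['m', 'p', '3']
  · simp [h18]
  by_cases h19 : u = ['w', 'a', 'v']
  · simp [h19]
  simp [eq_comm, h1, h2, h3, h4, h5, h6, h7, h8, h9, h10, h11, h12, h13, h14, h15, h16, h17, h18, h19]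
lemma pv_main_eq (fp : String) : get_cache_control_header fp = get_cache_control_header_alt fp := by
  unfold get_cache_control_header get_cache_control_header_alt
  rw [pv_hash_eq fp]
  by_cases hh : ((fp.toList.zip (fp.toList.drop 1)).any
      (fun p => p.1 == '-' && "abcdef0123456789".toList.contains p.2)) = true
  · simp only [hh, if_pos]
  · simp only [Bool.not_eq_true] at hh
    simp only [hh, Bool.false_eq_true, if_false]
    by_cases hdot : '.' ∈ fp.toList
    · obtain ⟨p, u, hcs, hu⟩ := pv_last_dot fp.toList hdot
      have hdotS : (("." : String)).toList = ['.'] := by decide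
      have hrf : PySem.Str.rfind fp "." = (p.length : Int) := by
        rw [PySem.Str.rfind_eq, hdotS]
        unfold PySem.Chars.rfind
        rw [hcs]
        exact pv_go_last p u hu _ (by simp) (le_refl _)
      have hne : ((p.length : Int) ≠ -1) := by omega
      have hext : (PySem.Str.slice fp (some (p.length : Int)) none).toList = '.' :: u := by
        simp only [PySem.Str.toList_slice, PySem.Chars.slice_eq_listSlice,
          PySem.List.slice_from_natCast, hcs, List.drop_left]
      have e1 : (PySem.Str.endswith fp ".html" = true) ↔ u = ['h', 't', 'm', 'l'] := by
        rw [PySem.Str.endswith_eq, hcs, show ((".html" : String)).toList = '.' :: ['h', 't', 'm', 'l'] by decide,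
          pv_endswith_iff_ext p u ['h', 't', 'm', 'l'] hu (by decide)]
        exact eq_comm
      have e2 : (PySem.Str.endswith fp ".js" = true) ↔ u = ['j', 's'] := by
        rw [PySem.Str.endswith_eq, hcs, show ((".js" : String)).toList = '.' :: ['j', 's'] by decide,
          pv_endswith_iff_ext p u ['j', 's'] hu (by decide)]
        exact eq_comm
      have e3 : (PySem.Str.endswith fp ".css" = true) ↔ u = ['c', 's', 's'] := by
        rw [PySem.Str.endswith_eq, hcs, show ((".css" : String)).toList = '.' :: ['c', 's', 's'] by decide,
          pv_endswith_iff_ext p u ['c', 's', 's'] hu (by decide)]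
        exact eq_comm
      have e4 : (PySem.Str.endswith fp ".json" = true) ↔ u = ['j', 's', 'o', 'n'] := by
        rw [PySem.Str.endswith_eq, hcs, show ((".json" : String)).toList = '.' :: ['j', 's', 'o', 'n'] by decide,
          pv_endswith_iff_ext p u ['j', 's', 'o', 'n'] hu (by decide)]
        exact eq_comm
      have e5 : (PySem.Str.endswith fp ".xml" = true) ↔ u = ['x', 'm', 'l'] := by
        rw [PySem.Str.endswith_eq, hcs, show ((".xml" : String)).toList = '.' :: ['x', 'm', 'l'] by decide,
          pv_endswith_iff_ext p u ['x', 'm', 'l'] hu (by decide)]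
        exact eq_comm
      have e6 : (PySem.Str.endswith fp ".pdf" = true) ↔ u = ['p', 'd', 'f'] := by
        rw [PySem.Str.endswith_eq, hcs, show ((".pdf" : String)).toList = '.' :: ['p', 'd', 'f'] by decide,
          pv_endswith_iff_ext p u ['p', 'd', 'f'] hu (by decide)]
        exact eq_comm
      have e7 : (PySem.Str.endswith fp ".doc" = true) ↔ u = ['d', 'o', 'c'] := by
        rw [PySem.Str.endswith_eq, hcs, show ((".doc" : String)).toList = '.' :: ['d', 'o', 'c'] by decide,
          pv_endswith_iff_ext p u ['d', 'o', 'c'] hu (by decide)]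
        exact eq_comm
      have e8 : (PySem.Str.endswith fp ".docx" = true) ↔ u = ['d', 'o', 'c', 'x'] := by
        rw [PySem.Str.endswith_eq, hcs, show ((".docx" : String)).toList = '.' :: ['d', 'o', 'c', 'x'] by decide,
          pv_endswith_iff_ext p u ['d', 'o', 'c', 'x'] hu (by decide)]
        exact eq_comm
      have e9 : (PySem.Str.endswith fp ".xls" = true) ↔ u = ['x', 'l', 's'] := by
        rw [PySem.Str.endswith_eq, hcs, show ((".xls" : String)).toList = '.' :: ['x', 'l', 's'] by decide,
          pv_endswith_iff_ext p u ['x', 'l', 's'] hu (by decide)]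
        exact eq_comm
      have e10 : (PySem.Str.endswith fp ".xlsx" = true) ↔ u = ['x', 'l', 's', 'x'] := by
        rw [PySem.Str.endswith_eq, hcs, show ((".xlsx" : String)).toList = '.' :: ['x', 'l', 's', 'x'] by decide,
          pv_endswith_iff_ext p u ['x', 'l', 's', 'x'] hu (by decide)]
        exact eq_comm
      have e11 : (PySem.Str.endswith fp ".png" = true) ↔ u = ['p', 'n', 'g'] := by
        rw [PySem.Str.endswith_eq, hcs, show ((".png" : String)).toList = '.' :: ['p', 'n', 'g'] by decide,
          pv_endswith_iff_ext p u ['p', 'n', 'g'] hu (by decide)]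
        exact eq_comm
      have e12 : (PySem.Str.endswith fp ".jpg" = true) ↔ u = ['j', 'p', 'g'] := by
        rw [PySem.Str.endswith_eq, hcs, show ((".jpg" : String)).toList = '.' :: ['j', 'p', 'g'] by decide,
          pv_endswith_iff_ext p u ['j', 'p', 'g'] hu (by decide)]
        exact eq_comm
      have e13 : (PySem.Str.endswith fp ".jpeg" = true) ↔ u = ['j', 'p', 'e', 'g'] := by
        rw [PySem.Str.endswith_eq, hcs, show ((".jpeg" : String)).toList = '.' :: ['j', 'p', 'e', 'g'] by decide,
          pv_endswith_iff_ext p u ['j', 'p', 'e', 'g'] hu (by decide)]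
        exact eq_comm
      have e14 : (PySem.Str.endswith fp ".gif" = true) ↔ u = ['g', 'i', 'f'] := by
        rw [PySem.Str.endswith_eq, hcs, show ((".gif" : String)).toList = '.' :: ['g', 'i', 'f'] by decide,
          pv_endswith_iff_ext p u ['g', 'i', 'f'] hu (by decide)]
        exact eq_comm
      have e15 : (PySem.Str.endswith fp ".svg" = true) ↔ u = ['s', 'v', 'g'] := by
        rw [PySem.Str.endswith_eq, hcs, show ((".svg" : String)).toList = '.' :: ['s', 'v', 'g'] by decide,
          pv_endswith_iff_ext p u ['s', 'v', 'g'] hu (by decide)]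
        exact eq_comm
      have e16 : (PySem.Str.endswith fp ".mp4" = true) ↔ u = ['m', 'p', '4'] := by
        rw [PySem.Str.endswith_eq, hcs, show ((".mp4" : String)).toList = '.' :: ['m', 'p', '4'] by decide,
          pv_endswith_iff_ext p u ['m', 'p', '4'] hu (by decide)]
        exact eq_comm
      have e17 : (PySem.Str.endswith fp ".webm" = true) ↔ u = ['w', 'e', 'b', 'm'] := by
        rw [PySem.Str.endswith_eq, hcs, show ((".webm" : String)).toList = '.' :: ['w', 'e', 'b', 'm'] by decide,
          pv_endswith_iff_ext p u ['w', 'e', 'b', 'm'] hu (by decide)]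
        exact eq_comm
      have e18 : (PySem.Str.endswith fp ".mp3" = true) ↔ u = ['m', 'p', '3'] := by
        rw [PySem.Str.endswith_eq, hcs, show ((".mp3" : String)).toList = '.' :: ['m', 'p', '3'] by decide,
          pv_endswith_iff_ext p u ['m', 'p', '3'] hu (by decide)]
        exact eq_comm
      have e19 : (PySem.Str.endswith fp ".wav" = true) ↔ u = ['w', 'a', 'v'] := by
        rw [PySem.Str.endswith_eq, hcs, show ((".wav" : String)).toList = '.' :: ['w', 'a', 'v'] by decide,
          pv_endswith_iff_ext p u ['w', 'a', 'v'] hu (by decide)]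
        exact eq_comm
      simp only [hrf, hne, ne_eq, not_false_iff, if_true]
      rw [pv_dict_eq _ u hext]
      simp only [List.any_cons, List.any_nil, Bool.or_eq_true, Bool.false_eq_true, or_false,
        e1, e2, e3, e4, e5, e6, e7, e8, e9, e10, e11, e12, e13, e14, e15, e16, e17, e18, e19]
      by_cases h1 : u = ['h', 't', 'm', 'l']
      · simp [h1]
      by_cases h2 : u = ['j', 's']
      · simp [h2]
      by_cases h3 : u = ['c', 's', 's']
      · simp [h3]
      by_cases h4 : u = ['j', 's', 'o', 'n']
      · simp [h4]
      by_cases h5 : u = ['x', 'm', 'l']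
      · simp [h5]
      by_cases h6 : u = ['p', 'd', 'f']
      · simp [h6]
      by_cases h7 : u = ['d', 'o', 'c']
      · simp [h7]
      by_cases h8 : u = ['d', 'o', 'c', 'x']
      · simp [h8]
      by_cases h9 : u = ['x', 'l', 's']
      · simp [h9]
      by_cases h10 : u = ['x', 'l', 's', 'x']
      · simp [h10]
      by_cases h11 : u = ['p', 'n', 'g']
      · simp [h11]
      by_cases h12 : u = ['j', 'p', 'g']
      · simp [h12]
      by_cases h13 : u = ['j', 'p', 'e', 'g']
      · simp [h13]
      by_cases h14 : u = ['g', 'i', 'f']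
      · simp [h14]
      by_cases h15 : u = ['s', 'v', 'g']
      · simp [h15]
      by_cases h16 : u = ['m', 'p', '4']
      · simp [h16]
      by_cases h17 : u = ['w', 'e', 'b', 'm']
      · simp [h17]
      by_cases h18 : u = ['m', 'p', '3']
      · simp [h18]
      by_cases h19 : u = ['w', 'a', 'v']
      · simp [h19]
      simp [h1, h2, h3, h4, h5, h6, h7, h8, h9, h10, h11, h12, h13, h14, h15, h16, h17, h18, h19]
    · have hrf : PySem.Str.rfind fp "." = -1 := by
        rw [PySem.Str.rfind_eq, show (("." : String)).toList = ['.'] by decide]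
        unfold PySem.Chars.rfind
        exact pv_go_none fp.toList hdot _
      have hne : ∀ t : List Char, '.' ∈ t → PySem.Chars.endswith fp.toList t = false := by
        intro t hs
        rw [Bool.eq_false_iff]
        intro h
        rw [PySem.Chars.endswith_iff] at h
        exact hdot (h.subset hs)
      simp only [hrf, ne_eq, not_true, if_false]
      simp [hne]
      decide

-- ===== VERDICT (by name: the statement is the Claim_ definition above) =====
theorem get_cache_control_header_spec : Claim_equal_get_cache_control_header := by
  intro fp _
  exact pv_main_eq fp
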